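-- pv_equiv track=rewrite | github.com/tanasa/Python.dev | project2/find_friends_in_graph.py | indirect_friends
-- ===== SOURCE A (Python) =====
-- def indirect_friends(uid, m):
--     """
--     Finds second-level friends (friends of friends) for a given user.
--     """
--
--     # Find direct friends
--     direct_friends = set()
--     for i, val in enumerate(m[uid]):
--         if val == 1:
--             direct_friends.add(i)
--
--     # Find indirect / second-level friends
--     indirect_friends = set()
--     for friend in direct_friends:
--         for j, val in enumerate(m[friend]):
--             if val == 1 and j not in direct_friends and j != uid:
--                 indirect_friends.add(j)
--
--     return sorted(indirect_friends)
-- ===== SOURCE B (Python) =====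
-- def indirect_friends(uid, m):
--     """Candidate-major scan: emit each second-level friend in increasing order (no sort)."""
--     row = m[uid]
--     friends = [f for f, v in enumerate(row) if v == 1]
--     width = max((len(m[f]) for f in friends), default=0)
--     out = []
--     for j in range(width):
--         if (j != uid
--                 and not (j < len(row) and row[j] == 1)
--                 and any(j < len(m[f]) and m[f][j] == 1 for f in friends)):
--             out.append(j)
--     return out
-- ===== Notes on version B (the rewrite author's own statement) =====
-- stated objective: alternative
-- what changed: A builds a set of direct friends, then a set of indirect friends via nested row scans and sorts it; B does a candidate-major scan: it lists the direct friends once, and for each candidate column index j in increasing order emits j if some friend's row marks it and it is neither uid nor a direct friend, so the output is produced already sorted with no sets and no sort.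
import Mathlib
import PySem

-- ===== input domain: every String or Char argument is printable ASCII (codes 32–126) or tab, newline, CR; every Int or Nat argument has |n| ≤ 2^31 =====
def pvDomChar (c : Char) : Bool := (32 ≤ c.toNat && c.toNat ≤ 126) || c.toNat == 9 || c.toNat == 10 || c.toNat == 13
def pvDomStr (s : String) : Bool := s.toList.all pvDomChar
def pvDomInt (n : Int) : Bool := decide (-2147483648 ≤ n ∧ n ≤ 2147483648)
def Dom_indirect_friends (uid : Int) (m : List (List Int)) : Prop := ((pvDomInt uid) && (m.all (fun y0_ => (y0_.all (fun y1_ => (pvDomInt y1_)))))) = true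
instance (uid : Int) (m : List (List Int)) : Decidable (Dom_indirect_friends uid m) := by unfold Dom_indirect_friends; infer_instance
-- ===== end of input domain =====

-- B replaces A's set-building scans plus final sort by a candidate-major scan that
-- emits each second-level friend directly in increasing order (objective: alternative).

-- ===== PORT A =====
def indirect_friends (uid : Int) (m : List (List Int)) : List Int :=
  let row := PySem.List.pyGetD m uid []
  let direct : PySem.Set Int :=
    (PySem.List.enumerate row 0).foldl
      (fun s p => if p.2 = 1 then PySem.Set.add s p.1 else s) PySem.Set.empty
  let indirect : PySem.Set Int :=
    direct.foldl
      (fun s f =>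
        (PySem.List.enumerate (PySem.List.pyGetD m f []) 0).foldl
          (fun (s2 : PySem.Set Int) (p : Int × Int) =>
            if p.2 = 1 ∧ ¬ (PySem.Set.contains direct p.1 = true) ∧ p.1 ≠ uid
            then PySem.Set.add s2 p.1 else s2) s)
      PySem.Set.empty
  PySem.List.sorted indirect (fun x => x)

-- ===== PORT B =====
def indirect_friends_alt (uid : Int) (m : List (List Int)) : List Int :=
  let row := PySem.List.pyGetD m uid []
  let friends := ((PySem.List.enumerate row 0).filter (fun p => p.2 == 1)).map Prod.fst
  let width := PySem.List.maxD (friends.map (fun f => PySem.List.len (PySem.List.pyGetD m f []))) (fun x => x) 0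
  (PySem.List.pyRange 0 width).filter (fun j =>
    decide (j ≠ uid) &&
    !(decide (j < PySem.List.len row) && decide (PySem.List.pyGetD row j 0 = 1)) &&
    friends.any (fun f =>
      decide (j < PySem.List.len (PySem.List.pyGetD m f [])) &&
      decide (PySem.List.pyGetD (PySem.List.pyGetD m f []) j 0 = 1)))

-- ===== PRECONDITION & SPEC =====
-- Pre_ excludes exactly the inputs on which the Python A raises IndexError:
-- uid not a valid (possibly negative) index into m, or some direct friend's row missing from m.
def Pre_indirect_friends (uid : Int) (m : List (List Int)) : Prop :=
  PySem.Raise.InRange m.length uid ∧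
  ∀ p ∈ PySem.List.enumerate (PySem.List.pyGetD m uid []) 0,
    p.2 = 1 → p.1 < PySem.List.len m
instance (uid : Int) (m : List (List Int)) : Decidable (Pre_indirect_friends uid m) := by
  unfold Pre_indirect_friends; infer_instance
def pvWitness_indirect_friends : Int × List (List Int) := (0, [[0, 1, 1], [1, 0, 1], [0, 0, 0]])
def Spec_indirect_friends (uid : Int) (m : List (List Int)) (out : List Int) : Prop := out = indirect_friends_alt uid m
instance (uid : Int) (m : List (List Int)) (out : List Int) : Decidable (Spec_indirect_friends uid m out) := by unfold Spec_indirect_friends; infer_instance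

-- ===== CLAIM (what is proved, stated in full; the proofs are below) =====
def Claim_equal_indirect_friends : Prop := ∀ (uid : Int) (m : List (List Int)), Dom_indirect_friends uid m → Pre_indirect_friends uid m → Spec_indirect_friends uid m (indirect_friends uid m)

-- ===== LEMMAS AND PROOFS =====

-- membership in A's inner "if … then add" accumulation
theorem mem_foldl_if_add {β : Type} (l : List (β × Int)) (P : β × Int → Prop) [DecidablePred P]
    (s0 : PySem.Set β) (x : β) [BEq β] [LawfulBEq β] :
    x ∈ l.foldl (fun s p => if P p then PySem.Set.add s p.1 else s) s0 ↔
      x ∈ s0 ∨ ∃ p ∈ l, P p ∧ x = p.1 := by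
  induction l generalizing s0 with
  | nil => simp
  | cons h t ih =>
    simp only [List.foldl_cons, List.mem_cons]
    split_ifs with hP
    · rw [ih]; simp [PySem.Set.mem_add]; tauto
    · rw [ih]; constructor
      · rintro (hx | ⟨p, hp, hPp, hxp⟩)
        · exact Or.inl hx
        · exact Or.inr ⟨p, Or.inr hp, hPp, hxp⟩
      · rintro (hx | ⟨p, (rfl | hp), hPp, hxp⟩)
        · exact Or.inl hx
        · exact absurd hPp hP
        · exact Or.inr ⟨p, hp, hPp, hxp⟩

theorem nodup_foldl_if_add {β : Type} (l : List (β × Int)) (P : β × Int → Prop) [DecidablePred P]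
    (s0 : PySem.Set β) [BEq β] [LawfulBEq β] (h0 : s0.Nodup) :
    (l.foldl (fun s p => if P p then PySem.Set.add s p.1 else s) s0).Nodup := by
  induction l generalizing s0 with
  | nil => exact h0
  | cons h t ih =>
    simp only [List.foldl_cons]
    split_ifs with hP
    · exact ih _ (PySem.Set.nodup_add _ _ h0)
    · exact ih _ h0

theorem mem_foldl_nested {β : Type} (fl : List β) (g : β → List (Int × Int))
    (P : β → Int × Int → Prop) [∀ f p, Decidable (P f p)]
    (s0 : PySem.Set Int) (x : Int) :
    x ∈ fl.foldl (fun s f => (g f).foldl (fun s2 p => if P f p then PySem.Set.add s2 p.1 else s2) s) s0 ↔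
      x ∈ s0 ∨ ∃ f ∈ fl, ∃ p ∈ g f, P f p ∧ x = p.1 := by
  induction fl generalizing s0 with
  | nil => simp
  | cons h t ih =>
    simp only [List.foldl_cons, List.mem_cons]
    rw [ih, mem_foldl_if_add]
    constructor
    · rintro (⟨hx | ⟨p, hp, hPp, hxp⟩⟩ | ⟨f, hf, p, hp, hPp, hxp⟩)
      · exact Or.inl hx
      · exact Or.inr ⟨h, Or.inl rfl, p, hp, hPp, hxp⟩
      · exact Or.inr ⟨f, Or.inr hf, p, hp, hPp, hxp⟩
    · rintro (hx | ⟨f, (rfl | hf), p, hp, hPp, hxp⟩)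
      · exact Or.inl (Or.inl hx)
      · exact Or.inl (Or.inr ⟨p, hp, hPp, hxp⟩)
      · exact Or.inr ⟨f, hf, p, hp, hPp, hxp⟩

theorem nodup_foldl_nested {β : Type} (fl : List β) (g : β → List (Int × Int))
    (P : β → Int × Int → Prop) [∀ f p, Decidable (P f p)]
    (s0 : PySem.Set Int) (h0 : s0.Nodup) :
    (fl.foldl (fun s f => (g f).foldl (fun s2 p => if P f p then PySem.Set.add s2 p.1 else s2) s) s0).Nodup := by
  induction fl generalizing s0 with
  | nil => exact h0
  | cons h t ih => exact ih _ (nodup_foldl_if_add _ _ _ h0)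

theorem pyRange_one_pairwise_lt : ∀ (n : Nat) (a b : Int), (b - a).toNat = n →
    (PySem.List.pyRange a b).Pairwise (· < ·) := by
  intro n
  induction n with
  | zero =>
    intro a b h
    have : b ≤ a := by omega
    rw [PySem.List.pyRange_one_eq_nil this]; exact List.Pairwise.nil
  | succ k ih =>
    intro a b h
    have hab : a < b := by omega
    rw [PySem.List.pyRange_one_cons hab]
    refine List.Pairwise.cons ?_ (ih (a + 1) b (by omega))
    intro y hy
    have := PySem.List.mem_pyRange_one.mp hy
    omega

-- ===== VERDICT (by name: the statement is the Claim_ definition above) =====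
theorem indirect_friends_spec : Claim_equal_indirect_friends := by
  intro uid m hDom hPre
  unfold Spec_indirect_friends
  simp only [indirect_friends, indirect_friends_alt]
  set row := PySem.List.pyGetD m uid [] with hrow
  set direct : PySem.Set Int :=
    (PySem.List.enumerate row 0).foldl
      (fun s p => if p.2 = 1 then PySem.Set.add s p.1 else s) PySem.Set.empty with hdirect
  set friends := ((PySem.List.enumerate row 0).filter (fun p => p.2 == 1)).map Prod.fst with hfriends
  set width := PySem.List.maxD (friends.map (fun f => PySem.List.len (PySem.List.pyGetD m f []))) (fun x => x) 0 with hwidth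
  -- characterize membership in direct
  have hmem_direct : ∀ x : Int, x ∈ direct ↔
      ∃ k : Nat, ∃ h : k < row.length, row[k] = 1 ∧ x = (k : Int) := by
    intro x
    rw [hdirect, mem_foldl_if_add]
    simp only [PySem.Set.empty, List.not_mem_nil, false_or]
    constructor
    · rintro ⟨p, hp, hP, rfl⟩
      obtain ⟨k, hk, rfl⟩ := (PySem.List.mem_enumerate_iff _ _ _).mp hp
      exact ⟨k, hk, hP, by simp⟩
    · rintro ⟨k, hk, h1, rfl⟩
      exact ⟨((k : Int), row[k]), (PySem.List.mem_enumerate_iff _ _ _).mpr ⟨k, hk, by simp⟩, h1, rfl⟩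
  have hmem_friends : ∀ x : Int, x ∈ friends ↔ x ∈ direct := by
    intro x
    rw [hmem_direct, hfriends]
    simp only [List.mem_map, List.mem_filter]
    constructor
    · rintro ⟨p, ⟨hp, hbeq⟩, rfl⟩
      obtain ⟨k, hk, rfl⟩ := (PySem.List.mem_enumerate_iff _ _ _).mp hp
      refine ⟨k, hk, ?_, by simp⟩
      simpa using hbeq
    · rintro ⟨k, hk, h1, rfl⟩
      exact ⟨((k : Int), row[k]), ⟨(PySem.List.mem_enumerate_iff _ _ _).mpr ⟨k, hk, by simp⟩, by simpa using h1⟩, rfl⟩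
  have hle_width : ∀ f ∈ friends, PySem.List.len (PySem.List.pyGetD m f []) ≤ width := by
    intro f hf
    exact PySem.List.le_maxD_id _ 0 _ (List.mem_map_of_mem hf)
  -- B's filter, as a Prop
  have hB : ∀ j : Int, j ∈ (PySem.List.pyRange 0 width).filter (fun j =>
      decide (j ≠ uid) &&
      !(decide (j < PySem.List.len row) && decide (PySem.List.pyGetD row j 0 = 1)) &&
      friends.any (fun f =>
        decide (j < PySem.List.len (PySem.List.pyGetD m f [])) &&
        decide (PySem.List.pyGetD (PySem.List.pyGetD m f []) j 0 = 1))) ↔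
      (0 ≤ j ∧ j < width) ∧ j ≠ uid ∧
      (j < PySem.List.len row → PySem.List.pyGetD row j 0 ≠ 1) ∧
      ∃ f ∈ friends, j < PySem.List.len (PySem.List.pyGetD m f []) ∧
        PySem.List.pyGetD (PySem.List.pyGetD m f []) j 0 = 1 := by
    intro j
    simp [List.mem_filter, PySem.List.mem_pyRange_one, List.any_eq_true, and_assoc]
    intros
    constructor
    · rintro (h | h) hlt
      · omega
      · exact h
    · intro h
      by_cases hlt : j < (row.length : Int)
      · exact Or.inr (h hlt)
      · exact Or.inl (by omega)
  apply PySem.List.sorted_eq_of_perm_of_pairwise_lt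
  · -- permutation via nodup + same membership
    rw [List.perm_ext_iff_of_nodup
      (List.Nodup.filter _ ((pyRange_one_pairwise_lt _ 0 width rfl).imp ne_of_lt))
      (nodup_foldl_nested _ _ _ PySem.Set.empty List.nodup_nil)]
    intro x
    rw [hB, mem_foldl_nested]
    simp only [PySem.Set.empty, List.not_mem_nil, false_or]
    constructor
    · -- B → A
      rintro ⟨⟨h0, hw⟩, hne, hnd, f, hf, hflen, hfval⟩
      have hxeq : ((x.toNat : Int)) = x := Int.toNat_of_nonneg h0
      have hjlt : x.toNat < (PySem.List.pyGetD m f []).length := by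
        rw [PySem.List.len_eq] at hflen; omega
      rw [PySem.List.pyGetD_eq_getElem _ 0 h0 (by rw [PySem.List.len_eq] at hflen; exact_mod_cast hflen)] at hfval
      have hnotmem : ¬ x ∈ direct := by
        intro hmem
        obtain ⟨k, hk, h1, rfl⟩ := (hmem_direct x).mp hmem
        refine hnd ?_ ?_
        · rw [PySem.List.len_eq]; exact_mod_cast hk
        · rw [PySem.List.pyGetD_eq_getElem _ 0 (by positivity) (by exact_mod_cast hk)]
          simpa using h1
      refine ⟨f, (hmem_friends f).mp hf,
        ((x.toNat : Int), (PySem.List.pyGetD m f [])[x.toNat]),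
        (PySem.List.mem_enumerate_iff _ _ _).mpr ⟨x.toNat, hjlt, by rw [zero_add]⟩, ?_, by rw [hxeq]⟩
      refine ⟨hfval, ?_, ?_⟩
      · rw [hxeq, PySem.Set.contains_iff]; simpa using hnotmem
      · rw [hxeq]; exact hne
    · -- A → B
      rintro ⟨f, hfd, p, hp, ⟨h1, hnc, hnu⟩, rfl⟩
      obtain ⟨k, hk, rfl⟩ := (PySem.List.mem_enumerate_iff _ _ _).mp hp
      simp only [zero_add] at *
      have hf' : f ∈ friends := (hmem_friends f).mpr hfd
      have hlenf : ((k : Int)) < PySem.List.len (PySem.List.pyGetD m f []) := by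
        rw [PySem.List.len_eq]; exact_mod_cast hk
      refine ⟨⟨by positivity, lt_of_lt_of_le hlenf (hle_width f hf')⟩, hnu, ?_, f, hf', hlenf, ?_⟩
      · intro hlt heq
        apply hnc
        rw [PySem.Set.contains_iff]
        refine (hmem_direct _).mpr ⟨k, ?_, ?_, rfl⟩
        · rw [PySem.List.len_eq] at hlt; exact_mod_cast hlt
        · rw [PySem.List.pyGetD_eq_getElem _ 0 (by positivity) (by rw [PySem.List.len_eq] at hlt; exact_mod_cast hlt)] at heq
          simpa using heq
      · rw [PySem.List.pyGetD_eq_getElem _ 0 (by positivity) (by exact_mod_cast hk)]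
        simpa using h1
  · exact (pyRange_one_pairwise_lt _ 0 width rfl).filter _
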